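-- pv_equiv track=rewrite | github.com/MrBrantCode/unitest_baseline | mut_generate/mist_train_cf/cf_43485/solution.py | punctuation_to_words
-- ===== SOURCE A (Python) =====
-- def punctuation_to_words(sentence):
--     punctuation_dict = {'.': ' dot ',
--                         ',': ' comma ',
--                         '!': ' exclamation mark ',
--                         '?': ' question mark ',
--                         "'": ' single quote ',
--                         '"': ' double quote ',
--                         ':': ' colon ',
--                         ';': ' semicolon '}
--
--     for punctuation, word in punctuation_dict.items():
--         sentence = sentence.replace(punctuation, word)
--
--     sentence = ' '.join(sentence.split())
--     return sentence
-- ===== SOURCE B (Python) =====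
-- def punctuation_to_words(sentence):
--     punctuation_dict = {'.': ' dot ',
--                         ',': ' comma ',
--                         '!': ' exclamation mark ',
--                         '?': ' question mark ',
--                         "'": ' single quote ',
--                         '"': ' double quote ',
--                         ':': ' colon ',
--                         ';': ' semicolon '}
--
--     pieces = [punctuation_dict.get(ch, ch) for ch in sentence]
--     return ' '.join(''.join(pieces).split())
-- ===== Notes on version B (the rewrite author's own statement) =====
-- stated objective: simpler
-- what changed: Replaces the eight sequential full-string replace passes by a single linear scan that maps each character through the dictionary once, then applies the same whitespace normalization.
import Mathlib
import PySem

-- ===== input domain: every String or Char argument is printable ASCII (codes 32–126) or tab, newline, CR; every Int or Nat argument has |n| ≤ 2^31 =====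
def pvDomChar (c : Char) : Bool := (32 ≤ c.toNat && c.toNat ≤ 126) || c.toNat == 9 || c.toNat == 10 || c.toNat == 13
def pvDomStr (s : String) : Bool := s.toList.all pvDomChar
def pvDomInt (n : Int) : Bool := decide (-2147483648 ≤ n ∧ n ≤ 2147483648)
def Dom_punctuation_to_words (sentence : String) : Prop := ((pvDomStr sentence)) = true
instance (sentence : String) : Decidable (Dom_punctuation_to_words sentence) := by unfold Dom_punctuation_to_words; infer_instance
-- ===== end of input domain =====

-- B replaces A's eight sequential full-string replace passes by one linear scan mapping each
-- character through the dictionary; objective: simpler (same final whitespace normalization).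

-- ===== PORT A =====
def punctuation_to_words (sentence : String) : String :=
  let punctuation_dict : PySem.Dict String String :=
    PySem.Dict.mk [(".", " dot "), (",", " comma "), ("!", " exclamation mark "),
                   ("?", " question mark "), ("'", " single quote "), ("\"", " double quote "),
                   (":", " colon "), (";", " semicolon ")]
  let s := punctuation_dict.items.foldl
    (fun acc kv => PySem.Str.replace acc kv.1 kv.2) sentence
  PySem.Str.join " " (PySem.Str.split₀ s)

-- ===== PORT B =====
def pwDict : PySem.Dict Char String :=
  PySem.Dict.mk [('.', " dot "), (',', " comma "), ('!', " exclamation mark "),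
                 ('?', " question mark "), ('\'', " single quote "), ('"', " double quote "),
                 (':', " colon "), (';', " semicolon ")]

def punctuation_to_words_alt (sentence : String) : String :=
  let pieces := sentence.toList.map (fun ch => pwDict.getD ch (String.ofList [ch]))
  PySem.Str.join " " (PySem.Str.split₀ (PySem.Str.join "" pieces))

-- ===== PRECONDITION & SPEC =====
def Spec_punctuation_to_words (sentence : String) (out : String) : Prop := out = punctuation_to_words_alt sentence
instance (sentence : String) (out : String) : Decidable (Spec_punctuation_to_words sentence out) := by unfold Spec_punctuation_to_words; infer_instance

-- ===== CLAIM (what is proved, stated in full; the proofs are below) =====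
def Claim_equal_punctuation_to_words : Prop := ∀ (sentence : String), Dom_punctuation_to_words sentence → Spec_punctuation_to_words sentence (punctuation_to_words sentence)

-- ===== LEMMAS AND PROOFS =====

-- single-character pattern substitution
def pvSub (p : Char) (w : List Char) (c : Char) : List Char := if c == p then w else [c]

lemma pv_go_single (p : Char) (w : List Char) :
    ∀ (l : List Char) (fuel : Nat) (acc : List Char), l.length ≤ fuel →
      PySem.Chars.replace.go [p] w fuel l acc = acc.reverse ++ l.flatMap (pvSub p w) := by
  intro l
  induction l with
  | nil =>
      intro fuel acc _
      cases fuel <;> simp [PySem.Chars.replace.go]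
  | cons c t ih =>
      intro fuel acc h
      cases fuel with
      | zero => simp at h
      | succ f =>
        have ht : t.length ≤ f := by simpa using h
        by_cases hc : p = c
        · subst hc
          simp [PySem.Chars.replace.go, List.isPrefixOf, ih _ _ ht, pvSub]
        · simp [PySem.Chars.replace.go, List.isPrefixOf, hc, ih _ _ ht, pvSub,
                Ne.symm hc]

lemma pv_replace_single (s : List Char) (p : Char) (w : List Char) :
    PySem.Chars.replace s [p] w = s.flatMap (pvSub p w) := by
  simpa [PySem.Chars.replace] using pv_go_single p w s s.length [] le_rfl

-- the combined one-pass substitution performed by B on a single character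
lemma pv_sub_chain (c : Char) :
    List.flatMap (fun x =>
      List.flatMap (fun x =>
        List.flatMap (fun x =>
          List.flatMap (fun x =>
            List.flatMap (fun x =>
              List.flatMap (fun x =>
                List.flatMap (pvSub ';' " semicolon ".toList)
                  (pvSub ':' " colon ".toList x))
                (pvSub '"' " double quote ".toList x))
              (pvSub '\'' " single quote ".toList x))
            (pvSub '?' " question mark ".toList x))
          (pvSub '!' " exclamation mark ".toList x))
        (pvSub ',' " comma ".toList x))
      (pvSub '.' " dot ".toList c)
    = (pwDict.getD c (String.ofList [c])).toList := by
  by_cases h1 : c = '.'; · subst h1; decide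
  by_cases h2 : c = ','; · subst h2; decide
  by_cases h3 : c = '!'; · subst h3; decide
  by_cases h4 : c = '?'; · subst h4; decide
  by_cases h5 : c = '\''; · subst h5; decide
  by_cases h6 : c = '"'; · subst h6; decide
  by_cases h7 : c = ':'; · subst h7; decide
  by_cases h8 : c = ';'; · subst h8; decide
  have e1 : ('.' == c) = false := beq_eq_false_iff_ne.mpr (Ne.symm h1)
  have e2 : (',' == c) = false := beq_eq_false_iff_ne.mpr (Ne.symm h2)
  have e3 : ('!' == c) = false := beq_eq_false_iff_ne.mpr (Ne.symm h3)
  have e4 : ('?' == c) = false := beq_eq_false_iff_ne.mpr (Ne.symm h4)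
  have e5 : ('\'' == c) = false := beq_eq_false_iff_ne.mpr (Ne.symm h5)
  have e6 : ('"' == c) = false := beq_eq_false_iff_ne.mpr (Ne.symm h6)
  have e7 : (':' == c) = false := beq_eq_false_iff_ne.mpr (Ne.symm h7)
  have e8 : (';' == c) = false := beq_eq_false_iff_ne.mpr (Ne.symm h8)
  simp [pvSub, pwDict, PySem.Dict.getD, PySem.Dict.get?, List.find?,
        e1, e2, e3, e4, e5, e6, e7, e8, h1, h2, h3, h4, h5, h6, h7, h8]

lemma pv_join_empty (parts : List (List Char)) :
    PySem.Chars.join [] parts = parts.flatten := by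
  induction parts with
  | nil => simp [PySem.Chars.join, List.intercalate]
  | cons a rest ih =>
      cases rest with
      | nil => simp [PySem.Chars.join, List.intercalate]
      | cons b r => simp [PySem.Chars.join_cons_cons, ih]

set_option maxHeartbeats 1000000 in
lemma pv_core (sentence : String) :
    punctuation_to_words sentence = punctuation_to_words_alt sentence := by
  simp only [punctuation_to_words, punctuation_to_words_alt, List.foldl]
  apply congrArg (fun s => PySem.Str.join " " (PySem.Str.split₀ s))
  apply String.toList_injective
  have t1 : (".":String).toList = ['.'] := rfl
  have t2 : (",":String).toList = [','] := rfl
  have t3 : ("!":String).toList = ['!'] := rfl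
  have t4 : ("?":String).toList = ['?'] := rfl
  have t5 : ("'":String).toList = ['\''] := rfl
  have t6 : ("\"":String).toList = ['"'] := rfl
  have t7 : (":":String).toList = [':'] := rfl
  have t8 : (";":String).toList = [';'] := rfl
  have t0 : ("":String).toList = [] := rfl
  simp only [PySem.Str.toList_replace, PySem.Str.toList_join, t0,
             t1, t2, t3, t4, t5, t6, t7, t8, pv_replace_single]
  rw [pv_join_empty, List.map_map, ← List.flatMap_def]
  simp only [List.flatMap_assoc]
  exact List.flatMap_congr fun c _ => pv_sub_chain c

-- ===== VERDICT (by name: the statement is the Claim_ definition above) =====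
theorem punctuation_to_words_spec : Claim_equal_punctuation_to_words := by
  intro sentence _
  exact pv_core sentence
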